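-- pv_equiv track=rewrite | github.com/jasonyl13579/CodeJam | Round A 2020/Pattern Matching.py | solver
-- ===== SOURCE A (Python) =====
-- def compare(ss):
--     if len(ss) == 0: return ''
--     ss = sorted(list(ss), key = lambda x: -len(x))
--     #print (ss)
--     for i in range(1, len(ss)):
--         for j in range(len(ss[i])):
--             if ss[i][j] != ss[0][j]: return '*'
--     return ss[0]
--
-- def solver(ss):
--     left = set()
--     right = set()
--     for s in ss:
--         subs = s.split('*')
--         if subs[0] != '': left.add(subs[0])
--         if subs[-1] != '': right.add(subs[-1][::-1])
--     ls, rs = compare(left), compare(right)[::-1]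
--     if ls == '*' or rs == '*': return '*'
--     else: return ls + rs
-- ===== SOURCE B (Python) =====
-- def solver(ss):
--     # Streaming alternative: maintain the longest-so-far prefix/suffix and a
--     # conflict flag instead of collecting sets, sorting and double-looping.
--     lp = rp = ''
--     bad_l = bad_r = False
--     for s in ss:
--         subs = s.split('*')
--         p = subs[0]
--         if p != '':
--             if lp.startswith(p):
--                 pass
--             elif p.startswith(lp):
--                 lp = p
--             else:
--                 bad_l = True
--         t = subs[-1]
--         if t != '':
--             q = t[::-1]
--             if rp.startswith(q):
--                 pass
--             elif q.startswith(rp):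
--                 rp = q
--             else:
--                 bad_r = True
--     if bad_l or bad_r:
--         return '*'
--     return lp + rp[::-1]
-- ===== Notes on version B (the rewrite author's own statement) =====
-- stated objective: alternative
-- what changed: Replaces the collect-into-two-sets + sort-by-length + nested compare loops with a single streaming pass that keeps a running longest prefix/suffix and a conflict flag, updating them with two startswith tests per pattern; correctness rests on the fact that 'all collected strings are prefixes of the longest' is exactly 'they form a prefix chain', which an incremental longest-so-far detects order-independently.
import Mathlib
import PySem

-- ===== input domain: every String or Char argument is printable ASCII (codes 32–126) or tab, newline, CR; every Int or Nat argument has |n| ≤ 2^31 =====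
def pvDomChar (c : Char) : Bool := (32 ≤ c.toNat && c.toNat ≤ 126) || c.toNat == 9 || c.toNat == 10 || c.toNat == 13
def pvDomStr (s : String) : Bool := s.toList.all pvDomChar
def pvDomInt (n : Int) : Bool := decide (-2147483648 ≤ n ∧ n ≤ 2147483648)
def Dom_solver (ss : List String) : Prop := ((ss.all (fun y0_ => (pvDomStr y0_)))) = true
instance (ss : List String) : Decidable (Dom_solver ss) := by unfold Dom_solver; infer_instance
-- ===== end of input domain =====

-- B replaces A's two-sets + sort-by-length + nested compare loops by one streaming pass
-- keeping a running longest prefix/suffix plus a conflict flag (objective: alternative).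

-- ===== PORT A =====
-- inner loop `for j in range(len(ss[i])): if ss[i][j] != ss[0][j]: return '*'`:
-- walks si comparing char by char against s0.  The `_ :: _, []` case (si longer than s0,
-- where Python would raise IndexError) is unreachable here because s0 is a longest element.
def pvMismatch : List Char → List Char → Bool
  | [], _ => false
  | _ :: _, [] => true
  | c :: cs, d :: ds => if c ≠ d then true else pvMismatch cs ds

-- outer loop `for i in range(1, len(ss))`: early-returns '*' on the first mismatch
def pvScan (s0 : List Char) : List (List Char) → Bool
  | [] => false
  | si :: t => if pvMismatch si s0 then true else pvScan s0 t

-- compare(ss): '' on the empty set, else sort by -len and scan against the head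
def pvCompare (s : PySem.Set String) : String :=
  if s.length = 0 then ""
  else
    match PySem.List.sorted s (fun x => -(PySem.Str.len x)) false with
    | [] => ""
    | s0 :: rest => if pvScan s0.toList (rest.map String.toList) then "*" else s0

-- loop body of solver: subs = s.split('*'); conditional set.add of subs[0] / subs[-1][::-1]
-- (`split? s "*"` is `some _` since "*" ≠ ""; subs[0]/subs[-1] rendered as headD/getLastD "")
def pvAStep (st : PySem.Set String × PySem.Set String) (s : String) :
    PySem.Set String × PySem.Set String :=
  let subs := (PySem.Str.split? s "*").getD []
  let l := if subs.headD "" ≠ "" then PySem.Set.add st.1 (subs.headD "") else st.1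
  let r := if subs.getLastD "" ≠ "" then
             PySem.Set.add st.2 (String.ofList (subs.getLastD "").toList.reverse)
           else st.2
  (l, r)

def solver (ss : List String) : String :=
  let st := ss.foldl pvAStep (PySem.Set.empty, PySem.Set.empty)
  let ls := pvCompare st.1
  let rs := String.ofList (pvCompare st.2).toList.reverse   -- compare(right)[::-1]
  if ls = "*" ∨ rs = "*" then "*" else String.ofList (ls.toList ++ rs.toList)

-- ===== PORT B =====
-- incremental prefix-chain update: keep the longest-so-far, or flag a conflict
def pvChainStep (st : String × Bool) (p : String) : String × Bool :=
  if PySem.Str.startswith st.1 p then st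
  else if PySem.Str.startswith p st.1 then (p, st.2)
  else (st.1, true)

-- loop body of B: same split and guards, then one chain update per side
def pvBStep (st : (String × Bool) × (String × Bool)) (s : String) :
    (String × Bool) × (String × Bool) :=
  let subs := (PySem.Str.split? s "*").getD []
  let p := subs.headD ""
  let t := subs.getLastD ""
  let lst := if p ≠ "" then pvChainStep st.1 p else st.1
  let rst := if t ≠ "" then pvChainStep st.2 (String.ofList t.toList.reverse) else st.2
  (lst, rst)

def solver_alt (ss : List String) : String :=
  let st := ss.foldl pvBStep (("", false), ("", false))
  if st.1.2 || st.2.2 then "*"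
  else String.ofList (st.1.1.toList ++ st.2.1.toList.reverse)

-- ===== PRECONDITION & SPEC =====
def Spec_solver (ss : List String) (out : String) : Prop := out = solver_alt ss
instance (ss : List String) (out : String) : Decidable (Spec_solver ss out) := by unfold Spec_solver; infer_instance

-- ===== CLAIM (what is proved, stated in full; the proofs are below) =====
def Claim_equal_solver : Prop := ∀ (ss : List String), Dom_solver ss → Spec_solver ss (solver ss)

-- ===== LEMMAS AND PROOFS =====

-- the left pieces (subs[0] when non-empty) collected in order
def pvLefts : List String → List String
  | [] => []
  | s :: ss =>
    let p := ((PySem.Str.split? s "*").getD []).headD ""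
    if p ≠ "" then p :: pvLefts ss else pvLefts ss

-- the reversed right pieces (subs[-1][::-1] when subs[-1] non-empty) collected in order
def pvRights : List String → List String
  | [] => []
  | s :: ss =>
    let t := ((PySem.Str.split? s "*").getD []).getLastD ""
    if t ≠ "" then String.ofList t.toList.reverse :: pvRights ss else pvRights ss

-- ---- the two folds decompose componentwise ----

lemma foldA_eq (ss : List String) (l r : PySem.Set String) :
    ss.foldl pvAStep (l, r) = (PySem.Set.update l (pvLefts ss), PySem.Set.update r (pvRights ss)) := by
  induction ss generalizing l r with
  | nil => simp [pvLefts, pvRights, PySem.Set.update_nil]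
  | cons s ss ih =>
    by_cases hp : ((PySem.Str.split? s "*").getD []).head?.getD "" = "" <;>
      by_cases ht : ((PySem.Str.split? s "*").getD []).getLast?.getD "" = "" <;>
        simp [pvAStep, pvLefts, pvRights, hp, ht, ih, PySem.Set.update_cons]

lemma foldB_eq (ss : List String) (a b : String × Bool) :
    ss.foldl pvBStep (a, b) = ((pvLefts ss).foldl pvChainStep a, (pvRights ss).foldl pvChainStep b) := by
  induction ss generalizing a b with
  | nil => simp [pvLefts, pvRights]
  | cons s ss ih =>
    by_cases hp : ((PySem.Str.split? s "*").getD []).head?.getD "" = "" <;>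
      by_cases ht : ((PySem.Str.split? s "*").getD []).getLast?.getD "" = "" <;>
        simp [pvBStep, pvLefts, pvRights, hp, ht, ih]

-- ---- split pieces contain no '*' ----

lemma splitOn_go_star (c : Char) (fuel : Nat) :
    ∀ (l cur : List Char) (acc : List (List Char)), l.length < fuel → c ∉ cur →
      (∀ p ∈ acc, c ∉ p) → ∀ p ∈ PySem.Chars.splitOn.go [c] fuel l cur acc, c ∉ p := by
  induction fuel with
  | zero => intro l cur acc h; omega
  | succ fuel ih =>
    intro l cur acc hf hcur hacc p hp
    match l with
    | [] =>
      simp only [PySem.Chars.splitOn.go] at hp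
      simp only [List.mem_reverse, List.mem_cons] at hp
      rcases hp with h | h
      · subst h; simpa using hcur
      · exact hacc _ h
    | ch :: rest =>
      simp only [PySem.Chars.splitOn.go] at hp
      by_cases hpre : [c].isPrefixOf (ch :: rest) = true
      · rw [if_pos hpre] at hp
        have hlen : (List.drop ([c] : List Char).length (ch :: rest)).length < fuel := by
          simp at hf ⊢; omega
        refine ih _ _ _ hlen (by simp) ?_ p hp
        intro q hq
        rcases List.mem_cons.mp hq with h | h
        · subst h; simpa using hcur
        · exact hacc _ h
      · rw [if_neg hpre] at hp
        have hch : c ≠ ch := by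
          intro h; subst h; simp [List.isPrefixOf] at hpre
        refine ih _ _ _ (by simp at hf ⊢; omega) ?_ hacc p hp
        intro h
        rcases List.mem_cons.mp h with h | h
        · exact hch h
        · exact hcur h

lemma splitOn_star (l : List Char) :
    ∀ p ∈ PySem.Chars.splitOn l ['*'], '*' ∉ p := by
  have := splitOn_go_star '*' (l.length + 1) l [] [] (by omega) (by simp) (by simp)
  simpa [PySem.Chars.splitOn] using this

lemma subs_eq (s : String) :
    (PySem.Str.split? s "*").getD [] =
      (PySem.Chars.splitOn s.toList ['*']).map String.ofList := by
  simp [PySem.Str.split?, PySem.Chars.split?]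

lemma getLastD_cases {α : Type} (xs : List α) (d : α) :
    xs.getLastD d = d ∨ xs.getLastD d ∈ xs :=
  List.mem_cons.mp List.getLastD_mem_cons

lemma head_piece (s : String) :
    ((PySem.Str.split? s "*").getD []).headD "" = "" ∨
      '*' ∉ (((PySem.Str.split? s "*").getD []).headD "").toList := by
  rw [subs_eq]
  rcases h : PySem.Chars.splitOn s.toList ['*'] with _ | ⟨p0, ps⟩
  · left; rfl
  · right
    have hp : '*' ∉ p0 := splitOn_star s.toList p0 (by rw [h]; exact List.mem_cons_self)
    simpa using hp

lemma last_piece (s : String) :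
    ((PySem.Str.split? s "*").getD []).getLastD "" = "" ∨
      '*' ∉ (((PySem.Str.split? s "*").getD []).getLastD "").toList := by
  rcases getLastD_cases ((PySem.Str.split? s "*").getD []) "" with h | h
  · left; exact h
  · right
    rw [subs_eq] at h
    rcases List.mem_map.mp h with ⟨p, hp, he⟩
    have hstar := splitOn_star s.toList p hp
    rw [subs_eq, ← he]
    simpa using hstar

-- every collected left piece is non-empty and star-free
lemma lefts_ne (ss : List String) : ∀ p ∈ pvLefts ss, p ≠ "" ∧ '*' ∉ p.toList := by
  induction ss with
  | nil => simp [pvLefts]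
  | cons s ss ih =>
    intro p hp
    simp only [pvLefts] at hp
    by_cases h : ((PySem.Str.split? s "*").getD []).headD "" = ""
    · rw [if_neg (by simpa using h)] at hp
      · exact ih p hp
    · rw [if_pos (by simpa using h)] at hp
      rcases List.mem_cons.mp hp with he | hm
      · subst he
        refine ⟨h, ?_⟩
        rcases head_piece s with h' | h'
        · exact absurd h' h
        · exact h'
      · exact ih p hm

-- every collected reversed right piece is non-empty and star-free
lemma rights_ne (ss : List String) : ∀ p ∈ pvRights ss, p ≠ "" ∧ '*' ∉ p.toList := by
  induction ss with
  | nil => simp [pvRights]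
  | cons s ss ih =>
    intro p hp
    simp only [pvRights] at hp
    by_cases h : ((PySem.Str.split? s "*").getD []).getLastD "" = ""
    · rw [if_neg (by simpa using h)] at hp
      exact ih p hp
    · rw [if_pos (by simpa using h)] at hp
      rcases List.mem_cons.mp hp with he | hm
      · subst he
        constructor
        · intro hcon
          have : (((PySem.Str.split? s "*").getD []).getLastD "").toList.reverse = ([] : List Char) := by
            have := congrArg String.toList hcon
            simpa using this
          have : (((PySem.Str.split? s "*").getD []).getLastD "").toList = [] := by
            simpa using this
          refine h ?_
          rw [← String.toList_inj]
          simpa using this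
        · rcases last_piece s with h' | h'
          · exact absurd h' h
          · simpa using h'
      · exact ih p hm

-- ---- characterisation of the incremental chain fold ----

lemma chain_true (ps : List String) (a : String) :
    (ps.foldl pvChainStep (a, true)).2 = true := by
  induction ps generalizing a with
  | nil => rfl
  | cons p ps ih =>
    simp only [List.foldl_cons, pvChainStep]
    split_ifs <;> exact ih _

lemma chain_false (ps : List String) (a : String)
    (h : (ps.foldl pvChainStep (a, false)).2 = false) :
    ((ps.foldl pvChainStep (a, false)).1 = a ∨ (ps.foldl pvChainStep (a, false)).1 ∈ ps) ∧
      a.toList <+: (ps.foldl pvChainStep (a, false)).1.toList ∧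
      ∀ x ∈ ps, x.toList <+: (ps.foldl pvChainStep (a, false)).1.toList := by
  induction ps generalizing a with
  | nil => exact ⟨Or.inl rfl, List.prefix_refl _, by simp⟩
  | cons p ps ih =>
    simp only [List.foldl_cons, pvChainStep] at h ⊢
    by_cases h1 : PySem.Str.startswith a p
    · rw [if_pos h1] at h ⊢
      obtain ⟨hmem, hpre, hall⟩ := ih a h
      have hpa : p.toList <+: a.toList := by
        rw [PySem.Str.startswith_eq] at h1
        exact (PySem.Chars.startswith_iff _ _).mp h1
      refine ⟨?_, hpre, ?_⟩
      · rcases hmem with h' | h' <;> [exact Or.inl h'; exact Or.inr (List.mem_cons_of_mem _ h')]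
      · intro x hx
        rcases List.mem_cons.mp hx with h' | h'
        · subst h'; exact hpa.trans hpre
        · exact hall x h'
    · rw [if_neg h1] at h ⊢
      by_cases h2 : PySem.Str.startswith p a
      · rw [if_pos h2] at h ⊢
        obtain ⟨hmem, hpre, hall⟩ := ih p h
        have hap : a.toList <+: p.toList := by
          rw [PySem.Str.startswith_eq] at h2
          exact (PySem.Chars.startswith_iff _ _).mp h2
        refine ⟨?_, hap.trans hpre, ?_⟩
        · rcases hmem with h' | h'
          · exact Or.inr (List.mem_cons.mpr (Or.inl h'))
          · exact Or.inr (List.mem_cons_of_mem _ h')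
        · intro x hx
          rcases List.mem_cons.mp hx with h' | h'
          · subst h'; exact hpre
          · exact hall x h'
      · rw [if_neg h2] at h
        exact absurd (chain_true ps a) (by rw [h]; simp)

lemma chain_conflict (ps : List String) (a : String)
    (h : (ps.foldl pvChainStep (a, false)).2 = true) :
    ∃ x y, (x = a ∨ x ∈ ps) ∧ y ∈ ps ∧
      ¬ x.toList <+: y.toList ∧ ¬ y.toList <+: x.toList := by
  induction ps generalizing a with
  | nil => simp at h
  | cons p ps ih =>
    simp only [List.foldl_cons, pvChainStep] at h
    by_cases h1 : PySem.Str.startswith a p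
    · rw [if_pos h1] at h
      obtain ⟨x, y, hx, hy, hxy⟩ := ih a h
      exact ⟨x, y, by tauto, List.mem_cons_of_mem _ hy, hxy⟩
    · rw [if_neg h1] at h
      by_cases h2 : PySem.Str.startswith p a
      · rw [if_pos h2] at h
        obtain ⟨x, y, hx, hy, hxy⟩ := ih p h
        refine ⟨x, y, ?_, List.mem_cons_of_mem _ hy, hxy⟩
        rcases hx with h' | h'
        · exact Or.inr (List.mem_cons.mpr (Or.inl h'))
        · exact Or.inr (List.mem_cons_of_mem _ h')
      · refine ⟨a, p, Or.inl rfl, List.mem_cons_self, ?_, ?_⟩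
        · intro hc
          exact h2 (by rw [PySem.Str.startswith_eq]; exact (PySem.Chars.startswith_iff _ _).mpr hc)
        · intro hc
          exact (by simpa using h1 : ¬ PySem.Str.startswith a p = true)
            (by rw [PySem.Str.startswith_eq]; exact (PySem.Chars.startswith_iff _ _).mpr hc)

-- ---- characterisation of A's compare loops ----

lemma pvMismatch_false_iff (si s0 : List Char) : pvMismatch si s0 = false ↔ si <+: s0 := by
  induction si generalizing s0 with
  | nil => simp [pvMismatch]
  | cons c cs ih =>
    cases s0 with
    | nil => simp [pvMismatch]
    | cons d ds =>
      by_cases h : c = d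
      · subst h
        simp [pvMismatch, ih, List.cons_prefix_cons]
      · simp [pvMismatch, h, List.cons_prefix_cons]

lemma pvScan_false_iff (s0 : List Char) (rest : List (List Char)) :
    pvScan s0 rest = false ↔ ∀ si ∈ rest, si <+: s0 := by
  induction rest with
  | nil => simp [pvScan]
  | cons si t ih =>
    by_cases h : pvMismatch si s0
    · simp [pvScan, h]
      intro hc
      exact absurd ((pvMismatch_false_iff si s0).mpr hc) (by simp [h])
    · simp only [Bool.not_eq_true] at h
      simp [pvScan, h, ih, (pvMismatch_false_iff si s0).mp h]

-- ---- MAIN: compare on the set of pieces = the streaming chain fold ----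

lemma main_eq (ps : List String) (hne : ∀ p ∈ ps, p ≠ "") :
    pvCompare (PySem.Set.ofList ps) =
      (if (ps.foldl pvChainStep ("", false)).2 then "*" else (ps.foldl pvChainStep ("", false)).1) := by
  by_cases hps : ps = []
  · subst hps; rfl
  · have hT : (PySem.Set.ofList ps : List String) ≠ [] := by
      obtain ⟨x, hx⟩ := List.exists_mem_of_ne_nil ps hps
      intro hc
      have : x ∈ (PySem.Set.ofList ps : List String) := (PySem.Set.mem_ofList ps x).mpr hx
      simp [hc] at this
    rcases hsort : PySem.List.sorted (PySem.Set.ofList ps : List String)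
        (fun x => -(PySem.Str.len x)) false with _ | ⟨s0, rest⟩
    · exact absurd ((PySem.List.sorted_eq_nil_iff _ _ _).mp hsort) hT
    have hmem : ∀ x : String, x ∈ s0 :: rest ↔ x ∈ ps := by
      intro x
      rw [← hsort, PySem.List.mem_sorted, PySem.Set.mem_ofList]
    have hs0 : s0 ∈ ps := (hmem s0).mp List.mem_cons_self
    have hCompare : pvCompare (PySem.Set.ofList ps) =
        (if pvScan s0.toList (rest.map String.toList) then "*" else s0) := by
      unfold pvCompare
      rw [if_neg (by simpa using hT), hsort]
    cases hfl : (ps.foldl pvChainStep ("", false)).2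
    · -- no conflict: the pieces form a prefix chain with maximum lp = s0
      obtain ⟨hmem', hpre, hall⟩ := chain_false ps "" hfl
      set lp := (ps.foldl pvChainStep ("", false)).1 with hlp
      have hlpne : lp ∈ ps := by
        rcases hmem' with h | h
        · exfalso
          obtain ⟨x, hx⟩ := List.exists_mem_of_ne_nil ps hps
          have := hall x hx
          rw [h] at this
          have hxnil : x.toList = [] := by simpa [List.prefix_nil] using this
          exact hne x hx (by rw [← String.toList_inj]; simpa using hxnil)
        · exact h
      have hlen : s0.toList.length = lp.toList.length := by
        have h1 : lp.toList.length ≤ s0.toList.length := by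
          have := PySem.List.key_head_sorted_le _ _ hsort lp
            ((PySem.Set.mem_ofList ps lp).mpr hlpne)
          simp only [PySem.Str.len_eq] at this
          omega
        have h2 : s0.toList.length ≤ lp.toList.length := (hall s0 hs0).length_le
        omega
      have hs0lp : s0 = lp := by
        rw [← String.toList_inj]
        exact (hall s0 hs0).eq_of_length (by omega)
      have hscan : pvScan s0.toList (rest.map String.toList) = false := by
        rw [pvScan_false_iff]
        intro si hsi
        rcases List.mem_map.mp hsi with ⟨x, hx, he⟩
        subst he
        rw [hs0lp]
        exact hall x ((hmem x).mp (List.mem_cons_of_mem _ hx))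
      rw [hCompare, hscan]
      simpa using hs0lp
    · -- conflict: two incomparable pieces, so the scan must find a mismatch
      obtain ⟨x, y, hx, hy, hxy1, hxy2⟩ := chain_conflict ps "" hfl
      have hxps : x ∈ ps := by
        rcases hx with h | h
        · exfalso; exact hxy1 (h ▸ List.nil_prefix)
        · exact h
      have hscan : pvScan s0.toList (rest.map String.toList) = true := by
        by_contra hc
        simp only [Bool.not_eq_true] at hc
        have hall : ∀ z ∈ ps, z.toList <+: s0.toList := by
          intro z hz
          rcases List.mem_cons.mp ((hmem z).mpr hz) with h | h
          · subst h; exact List.prefix_refl _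
          · exact (pvScan_false_iff _ _).mp hc z.toList (List.mem_map_of_mem h)
        rcases List.prefix_or_prefix_of_prefix (hall x hxps) (hall y hy) with h | h
        · exact hxy1 h
        · exact hxy2 h
      rw [hCompare, hscan]
      rfl

-- ===== VERDICT (by name: the statement is the Claim_ definition above) =====
theorem solver_spec : Claim_equal_solver := by
  intro ss _
  unfold Spec_solver solver solver_alt
  simp only [foldA_eq, foldB_eq, PySem.Set.update_empty]
  have hL := main_eq (pvLefts ss) (fun p hp => (lefts_ne ss p hp).1)
  have hR := main_eq (pvRights ss) (fun p hp => (rights_ne ss p hp).1)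
  cases hfl : ((pvLefts ss).foldl pvChainStep ("", false)).2
  case true =>
    rw [hfl] at hL
    simp only [if_pos] at hL
    simp [hL]
  case false =>
    rw [hfl] at hL
    simp only [Bool.false_eq_true, if_false] at hL
    cases hfr : ((pvRights ss).foldl pvChainStep ("", false)).2
    case true =>
      rw [hfr] at hR
      simp only [if_pos] at hR
      simp [hR]
    case false =>
      rw [hfr] at hR
      simp only [Bool.false_eq_true, if_false] at hR
      set lp := ((pvLefts ss).foldl pvChainStep ("", false)).1 with hlp
      set rp := ((pvRights ss).foldl pvChainStep ("", false)).1 with hrp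
      have hlpstar : lp ≠ "*" := by
        rcases (chain_false _ _ hfl).1 with h | h
        · rw [hlp, h]; intro hc; exact absurd hc (by decide)
        · intro hc
          exact (lefts_ne ss lp h).2 (by rw [hc]; decide)
      have hrpstar : String.ofList rp.toList.reverse ≠ "*" := by
        rcases (chain_false _ _ hfr).1 with h | h
        · rw [hrp, h]; intro hc; exact absurd hc (by decide)
        · intro hc
          have h1 : rp.toList.reverse = ['*'] := by
            have := congrArg String.toList hc
            simpa using this
          have h2 : '*' ∈ rp.toList := by
            rw [← List.mem_reverse, h1]; exact List.mem_cons_self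
          exact (rights_ne ss rp h).2 h2
      rw [hL, hR]
      simp [hlpstar, hrpstar]
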